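-- pv_equiv track=rewrite | github.com/Aitizaz66/My-Pycharm-Projects | BS-3A-Aitizaz-Junior/Lab7.py | get_palindrom
-- ===== SOURCE A (Python) =====
-- def get_palindrom(a):
--     plist = []
--     for word in a:
--         small = word.lower()
--         reverse = ""
--         for l in small:
--             reverse = l + reverse
--         if small == reverse:
--             plist.append(word)
--     return plist
-- ===== SOURCE B (Python) =====
-- def get_palindrom(a):
--     plist = []
--     for word in a:
--         small = word.lower()
--         n = len(small)
--         i = 0
--         ok = True
--         while i < n // 2:
--             if small[i] != small[n - 1 - i]:
--                 ok = False
--                 break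
--             i += 1
--         if ok:
--             plist.append(word)
--     return plist
-- ===== Notes on version B (the rewrite author's own statement) =====
-- stated objective: alternative
-- what changed: Replaces A's construction of a reversed copy of each lowercased word with an in-place two-pointer index scan that compares characters from both ends and stops at the first mismatch, so no reversed string is ever built.
import Mathlib
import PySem

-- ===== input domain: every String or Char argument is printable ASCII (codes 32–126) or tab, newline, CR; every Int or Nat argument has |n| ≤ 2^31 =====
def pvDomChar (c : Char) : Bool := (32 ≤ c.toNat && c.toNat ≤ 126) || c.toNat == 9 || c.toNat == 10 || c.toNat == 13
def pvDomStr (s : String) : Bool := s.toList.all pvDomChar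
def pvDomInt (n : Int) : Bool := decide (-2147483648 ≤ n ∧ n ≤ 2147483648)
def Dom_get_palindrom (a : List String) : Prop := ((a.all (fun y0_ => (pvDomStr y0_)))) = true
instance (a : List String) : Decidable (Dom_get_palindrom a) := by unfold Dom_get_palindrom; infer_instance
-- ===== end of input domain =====

-- B replaces building a reversed copy of each lowercased word by a two-pointer index scan
-- comparing characters from both ends; equivalence of the return values is proved below.

-- ===== PORT A =====
-- A accumulates the lowercased word's characters front-to-back into `reverse`
-- (reverse = l + reverse), then filters by small == reverse.
def get_palindrom (a : List String) : List String :=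
  a.foldl (fun plist word =>
    let small := (PySem.Str.lower word).toList
    let reverse := small.foldl (fun rev l => l :: rev) []
    if small = reverse then plist ++ [word] else plist) []

-- ===== PORT B =====
-- two-pointer while loop: i runs while i < n/2, comparing small[i] with small[n-1-i];
-- returns false (ok = False, break) on the first mismatch.
def pvTwoPtr (small : List Char) (i : Nat) : Bool :=
  if _h : i < small.length / 2 then
    if small.getD i ' ' = small.getD (small.length - 1 - i) ' ' then
      pvTwoPtr small (i + 1)
    else false
  else true
termination_by small.length / 2 - i

def get_palindrom_alt (a : List String) : List String :=
  a.foldl (fun plist word =>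
    let small := (PySem.Str.lower word).toList
    if pvTwoPtr small 0 then plist ++ [word] else plist) []

-- ===== PRECONDITION & SPEC =====
def Spec_get_palindrom (a : List String) (out : List String) : Prop := out = get_palindrom_alt a
instance (a : List String) (out : List String) : Decidable (Spec_get_palindrom a out) := by unfold Spec_get_palindrom; infer_instance

-- ===== CLAIM (what is proved, stated in full; the proofs are below) =====
def Claim_equal_get_palindrom : Prop := ∀ (a : List String), Dom_get_palindrom a → Spec_get_palindrom a (get_palindrom a)

-- ===== LEMMAS AND PROOFS =====

theorem foldl_cons_rev (cs acc : List Char) :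
    cs.foldl (fun rev l => l :: rev) acc = cs.reverse ++ acc := by
  induction cs generalizing acc with
  | nil => simp
  | cons c cs ih => simp [List.foldl, ih]

theorem twoPtr_true_iff (cs : List Char) (i : Nat)
    (hpre : ∀ j < i, cs.getD j ' ' = cs.getD (cs.length - 1 - j) ' ') :
    pvTwoPtr cs i = true ↔
      ∀ j, j < cs.length / 2 → cs.getD j ' ' = cs.getD (cs.length - 1 - j) ' ' := by
  unfold pvTwoPtr
  split
  · rename_i h
    split
    · rename_i heq
      rw [twoPtr_true_iff cs (i + 1) (by
        intro j hj
        rcases Nat.lt_succ_iff_lt_or_eq.mp hj with hj' | hj'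
        · exact hpre j hj'
        · subst hj'; exact heq)]
    · rename_i hne
      exact ⟨fun hc => by simp at hc, fun hall => absurd (hall i h) hne⟩
  · rename_i h
    simp only [true_iff]
    intro j hj
    exact hpre j (by omega)
termination_by cs.length / 2 - i

theorem half_check_iff_palindrome (cs : List Char) :
    (∀ j, j < cs.length / 2 → cs.getD j ' ' = cs.getD (cs.length - 1 - j) ' ')
      ↔ cs = cs.reverse := by
  constructor
  · intro hhalf
    apply List.ext_getElem (by simp)
    intro j h1 h2
    have hlen : cs.length = cs.reverse.length := by simp
    have hj : j < cs.length := h1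
    have key : cs.getD j ' ' = cs.getD (cs.length - 1 - j) ' ' := by
      by_cases hc : j < cs.length / 2
      · exact hhalf j hc
      · by_cases hc2 : cs.length - 1 - j < cs.length / 2
        · have := hhalf (cs.length - 1 - j) hc2
          have : cs.getD (cs.length - 1 - j) ' ' = cs.getD j ' ' := by
            rw [this]; congr 1; omega
          exact this.symm
        · have : cs.length - 1 - j = j := by omega
          rw [this]
    have hlt : cs.length - 1 - j < cs.length := by omega
    calc cs[j] = cs.getD j ' ' := by rw [List.getD_eq_getElem _ _ hj]
      _ = cs.getD (cs.length - 1 - j) ' ' := key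
      _ = cs[cs.length - 1 - j] := by rw [List.getD_eq_getElem _ _ hlt]
      _ = cs.reverse[j] := by rw [List.getElem_reverse]
  · intro hpal j hj
    have hjl : j < cs.length := by omega
    have hlt : cs.length - 1 - j < cs.length := by omega
    have h1 : cs.reverse.getD j ' ' = cs.getD (cs.length - 1 - j) ' ' := by
      rw [List.getD_eq_getElem _ _ (by simpa using hjl), List.getD_eq_getElem _ _ hlt,
        List.getElem_reverse]
    exact (congrArg (fun l => List.getD l j ' ') hpal).trans h1

theorem step_eq (plist : List String) (word : String) :
    (let small := (PySem.Str.lower word).toList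
     let reverse := small.foldl (fun rev l => l :: rev) []
     if small = reverse then plist ++ [word] else plist)
    = (let small := (PySem.Str.lower word).toList
       if pvTwoPtr small 0 then plist ++ [word] else plist) := by
  simp only [foldl_cons_rev, List.append_nil]
  have := (twoPtr_true_iff (PySem.Str.lower word).toList 0 (by intro j hj; omega)).trans
    (half_check_iff_palindrome (PySem.Str.lower word).toList)
  by_cases h : (PySem.Str.lower word).toList = (PySem.Str.lower word).toList.reverse
  · rw [if_pos h, if_pos (this.mpr h)]
  · rw [if_neg h, if_neg (by intro hc; exact h (this.mp hc))]

-- ===== VERDICT (by name: the statement is the Claim_ definition above) =====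
theorem get_palindrom_spec : Claim_equal_get_palindrom := by
  intro a _
  unfold Spec_get_palindrom get_palindrom get_palindrom_alt
  congr 1
  funext plist word
  exact step_eq plist word
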